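-- pv_equiv track=rewrite | github.com/rrwick/Trycycler | trycycler/base_scores.py | add_indels_to_per_base_scores
-- ===== SOURCE A (Python) =====
-- def add_indels_to_per_base_scores(msa_seqs, per_base_scores):
--     """
--     This function takes the per-base scores as input and outputs a similar set of per-base scores,
--     but this time with the MSA indels included. All output per-base score lists will therefore be
--     the same length.
--     For example:
--       seq:    ACGACTAGCTACACG  ->  ACGACT--AGCTAC-ACG
--       scores: 356289238951365  ->  356289222389511365
--     """
--     msa_per_base_scores = {}
--     for seq_name, msa_seq in msa_seqs.items():
--
--         # First we make the scores for the sequence using None as a placeholder for the indels.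
--         i = 0
--         scores = []
--         for base in msa_seq:
--             if base == '-':
--                 scores.append(None)
--             else:
--                 scores.append(per_base_scores[seq_name][i])
--                 i += 1
--
--         # Sanity checks.
--         assert i == len(per_base_scores[seq_name])
--         assert len(scores) == len(msa_seq)
--
--         # Then we replace the Nones with the lowest of the neighbouring scores.
--         forward_scores, reverse_scores, final_scores = [], [], []
--         current_score = None
--         for i, score in enumerate(scores):
--             if score is not None:
--                 current_score = score
--             forward_scores.append(current_score)
--         current_score = None
--         for i in range(len(scores) - 1, -1, -1):
--             score = scores[i]
--             if score is not None:
--                 current_score = score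
--             reverse_scores.append(current_score)
--         reverse_scores = reverse_scores[::-1]
--         assert len(forward_scores) == len(reverse_scores)
--         for i in range(len(scores)):
--             forward_score, reverse_score = forward_scores[i], reverse_scores[i]
--             assert forward_score is not None or reverse_score is not None
--             if forward_score is None:
--                 final_scores.append(reverse_score)
--             elif reverse_score is None:
--                 final_scores.append(forward_score)
--             else:  # neither are None
--                 if msa_seq[i] == '-':
--                     if forward_score < reverse_score:
--                         final_scores.append(forward_score)
--                     else:
--                         final_scores.append(reverse_score)
--                 else:
--                     assert forward_score == reverse_score
--                     final_scores.append(forward_score)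
--         assert len(forward_scores) == len(final_scores)
--
--         msa_per_base_scores[seq_name] = final_scores
--
--     return msa_per_base_scores
-- ===== SOURCE B (Python) =====
-- def add_indels_to_per_base_scores(msa_seqs, per_base_scores):
--     """Single forward pass: each non-gap base consumes the next score; each gap is
--     filled from the last score emitted (left) and the next unconsumed score (right),
--     taking min when both exist."""
--     msa_per_base_scores = {}
--     for seq_name, msa_seq in msa_seqs.items():
--         pbs = per_base_scores[seq_name]
--         assert sum(1 for b in msa_seq if b != '-') == len(pbs)
--         i = 0
--         left = None
--         final_scores = []
--         for base in msa_seq: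
--             if base != '-':
--                 s = pbs[i]
--                 i += 1
--                 left = s
--                 final_scores.append(s)
--             else:
--                 right = pbs[i] if i < len(pbs) else None
--                 if left is None:
--                     assert right is not None
--                     final_scores.append(right)
--                 elif right is None:
--                     final_scores.append(left)
--                 else:
--                     final_scores.append(min(left, right))
--         msa_per_base_scores[seq_name] = final_scores
--     return msa_per_base_scores
-- ===== Notes on version B (the rewrite author's own statement) =====
-- stated objective: simpler
-- what changed: B fills indels in one forward pass over the MSA sequence, taking min of the last emitted score and the next unconsumed score at each gap, instead of A's four passes (None-placeholder list, forward scan, reverse scan + reversal, merge pass).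
import Mathlib
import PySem

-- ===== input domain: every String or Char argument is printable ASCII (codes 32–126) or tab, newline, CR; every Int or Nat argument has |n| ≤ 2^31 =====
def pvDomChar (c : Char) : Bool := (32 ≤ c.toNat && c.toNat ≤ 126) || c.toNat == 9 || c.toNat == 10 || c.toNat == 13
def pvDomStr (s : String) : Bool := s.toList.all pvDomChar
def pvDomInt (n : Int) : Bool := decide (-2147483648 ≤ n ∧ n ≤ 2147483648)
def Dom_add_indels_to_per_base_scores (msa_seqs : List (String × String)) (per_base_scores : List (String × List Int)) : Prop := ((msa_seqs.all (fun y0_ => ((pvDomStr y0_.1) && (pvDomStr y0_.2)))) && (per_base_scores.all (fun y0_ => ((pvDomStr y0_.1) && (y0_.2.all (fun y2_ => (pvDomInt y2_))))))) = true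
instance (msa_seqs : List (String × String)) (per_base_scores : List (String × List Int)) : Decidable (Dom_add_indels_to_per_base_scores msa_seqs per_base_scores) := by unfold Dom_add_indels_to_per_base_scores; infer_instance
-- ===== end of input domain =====

-- B replaces A's four passes per sequence (None-placeholder list, forward scan,
-- reverse scan + reversal, merge pass) by a single forward pass that fills each gap
-- from the last emitted score and the next unconsumed score; objective: simpler.


-- ===== PORT A =====
-- loop 1: build scores with None placeholders; i counts consumed scores.
-- pbs[i] raises IndexError when out of range in Python (excluded by Pre_);
-- the port uses getD 0 there (i is a nonnegative counter, so plain Nat indexing is exact).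
def pvA_mkScores : List Char → List Int → Nat → List (Option Int) × Nat
  | [], _, i => ([], i)
  | c :: cs, pbs, i =>
    if c = '-' then
      let r := pvA_mkScores cs pbs i
      (none :: r.1, r.2)
    else
      let r := pvA_mkScores cs pbs (i + 1)
      (some (pbs.getD i 0) :: r.1, r.2)

-- loop 2 (and, applied to scores.reverse, loop 3): carry current_score, append it for each element
def pvA_scan : Option Int → List (Option Int) → List (Option Int)
  | _, [] => []
  | cur, s :: rest =>
    let cur' := match s with | some _ => s | none => cur
    cur' :: pvA_scan cur' rest

-- body of the merge loop; Python's asserts raise on the inputs Pre_ excludes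
-- (both-None position = nonempty all-gap sequence); the port yields 0 there.
def pvA_comb (f r : Option Int) (c : Char) : Int :=
  match f, r with
  | none, r => r.getD 0
  | some fv, none => fv
  | some fv, some rv => if c = '-' then (if fv < rv then fv else rv) else fv

-- loop 4: `for i in range(len(scores))` over three equal-length lists, ported as a
-- synchronized traversal (forward_scores, reverse_scores and msa_seq all have len(scores))
def pvA_final : List (Option Int) → List (Option Int) → List Char → List Int
  | f :: fs, r :: rs, c :: cs => pvA_comb f r c :: pvA_final fs rs cs
  | _, _, _ => []

-- per_base_scores[seq_name]: KeyError when absent (excluded by Pre_), getD [] there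
def add_indels_to_per_base_scores (msa_seqs : List (String × String)) (per_base_scores : List (String × List Int)) : List (String × List Int) :=
  (msa_seqs.foldl (fun acc p =>
    let pbs := ((PySem.Dict.mk per_base_scores).get? p.1).getD []
    let cs := p.2.toList
    let scores := (pvA_mkScores cs pbs 0).1
    let forward := pvA_scan none scores
    let revs := (pvA_scan none scores.reverse).reverse
    acc.insert p.1 (pvA_final forward revs cs)) PySem.Dict.empty).items

-- ===== PORT B =====
-- single pass: left = last real score emitted; pbs holds the not-yet-consumed scores,
-- so pbs.head? is Source B's `pbs[i] if i < len(pbs) else None`. The none/none branch is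
-- Source B's assert (unreachable under Pre_); the [] branch under a non-gap is Source B's
-- count assert (unreachable under Pre_).
def pvB_fill : Option Int → List Char → List Int → List Int
  | _, [], _ => []
  | left, c :: cs, pbs =>
    if c = '-' then
      (match left, pbs.head? with
       | some l, some r => min l r
       | some l, none => l
       | none, some r => r
       | none, none => 0) :: pvB_fill left cs pbs
    else
      match pbs with
      | s :: ps => s :: pvB_fill (some s) cs ps
      | [] => []

def add_indels_to_per_base_scores_alt (msa_seqs : List (String × String)) (per_base_scores : List (String × List Int)) : List (String × List Int) :=
  (msa_seqs.foldl (fun acc p =>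
    let pbs := ((PySem.Dict.mk per_base_scores).get? p.1).getD []
    acc.insert p.1 (pvB_fill none p.2.toList pbs)) PySem.Dict.empty).items

-- ===== PRECONDITION & SPEC =====
def pvCountNonGap (cs : List Char) : Nat := (cs.filter (fun c => c ≠ '-')).length

-- Pre_ holds exactly where Python A returns: every msa name has a score list
-- (else KeyError), whose length equals the sequence's non-gap count (else
-- IndexError/AssertionError), and no nonempty sequence is all gaps (else
-- AssertionError). Key lists are duplicate-free: the arguments are Python dicts,
-- so duplicate keys cannot arise; this clause excludes no Python input.
def Pre_add_indels_to_per_base_scores (msa_seqs : List (String × String)) (per_base_scores : List (String × List Int)) : Prop :=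
  (msa_seqs.map Prod.fst).Nodup ∧ (per_base_scores.map Prod.fst).Nodup ∧
  (msa_seqs.all (fun p =>
    match (PySem.Dict.mk per_base_scores).get? p.1 with
    | none => false
    | some sc => pvCountNonGap p.2.toList == sc.length
        && (p.2.toList.isEmpty || p.2.toList.any (fun c => c ≠ '-')))) = true
instance (msa_seqs : List (String × String)) (per_base_scores : List (String × List Int)) : Decidable (Pre_add_indels_to_per_base_scores msa_seqs per_base_scores) := by unfold Pre_add_indels_to_per_base_scores; infer_instance

def pvWitness_add_indels_to_per_base_scores : (List (String × String)) × (List (String × List Int)) :=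
  ([("seq_a", "AC-G-"), ("seq_b", "--T")], [("seq_a", [3, 5, 2]), ("seq_b", [7])])

def Spec_add_indels_to_per_base_scores (msa_seqs : List (String × String)) (per_base_scores : List (String × List Int)) (out : List (String × List Int)) : Prop := out = add_indels_to_per_base_scores_alt msa_seqs per_base_scores
instance (msa_seqs : List (String × String)) (per_base_scores : List (String × List Int)) (out : List (String × List Int)) : Decidable (Spec_add_indels_to_per_base_scores msa_seqs per_base_scores out) := by unfold Spec_add_indels_to_per_base_scores; infer_instance

-- ===== CLAIM (what is proved, stated in full; the proofs are below) =====
def Claim_equal_add_indels_to_per_base_scores : Prop := ∀ (msa_seqs : List (String × String)) (per_base_scores : List (String × List Int)), Dom_add_indels_to_per_base_scores msa_seqs per_base_scores → Pre_add_indels_to_per_base_scores msa_seqs per_base_scores → Spec_add_indels_to_per_base_scores msa_seqs per_base_scores (add_indels_to_per_base_scores msa_seqs per_base_scores)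

-- ===== LEMMAS AND PROOFS =====

-- relative view of loop 1: scores with the already-consumed prefix dropped
def pvMkRel : List Char → List Int → List (Option Int)
  | [], _ => []
  | c :: cs, pbs =>
    if c = '-' then none :: pvMkRel cs pbs
    else some (pbs.headD 0) :: pvMkRel cs pbs.tail

lemma pvA_mkScores_eq_rel (cs : List Char) (pbs : List Int) (i : Nat) :
    (pvA_mkScores cs pbs i).1 = pvMkRel cs (pbs.drop i) := by
  induction cs generalizing i with
  | nil => rfl
  | cons c cs ih =>
    by_cases h : c = '-' <;>
      simp [pvA_mkScores, pvMkRel, h, ih, List.getD_eq_getElem?_getD,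
        List.headD_eq_head?_getD, List.head?_drop, List.tail_drop]

-- first non-None entry of a score list
def pvFstSome : List (Option Int) → Option Int
  | [] => none
  | some v :: _ => some v
  | none :: xs => pvFstSome xs

-- running state of pvA_scan
def pvSt (c : Option Int) (l : List (Option Int)) : Option Int :=
  l.foldl (fun a x => match x with | some _ => x | none => a) c

lemma pvSt_reverse (c : Option Int) (l : List (Option Int)) :
    pvSt c l.reverse = match pvFstSome l with | some v => some v | none => c := by
  induction l generalizing c with
  | nil => rfl
  | cons x xs ih =>
    simp only [pvSt] at ih ⊢
    simp only [List.reverse_cons, List.foldl_append, List.foldl_cons, List.foldl_nil]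
    cases x with
    | some v => rfl
    | none => simp [pvFstSome, ih c]

lemma pvA_scan_append (c : Option Int) (l₁ l₂ : List (Option Int)) :
    pvA_scan c (l₁ ++ l₂) = pvA_scan c l₁ ++ pvA_scan (pvSt c l₁) l₂ := by
  induction l₁ generalizing c with
  | nil => simp [pvA_scan, pvSt]
  | cons x xs ih => cases x <;> simp [pvA_scan, pvSt, ih, List.foldl_cons]

-- the reversed backward scan, computed front-to-back
def pvRsc : List (Option Int) → List (Option Int)
  | [] => []
  | x :: xs => (match x with | some _ => x | none => pvFstSome xs) :: pvRsc xs

lemma pvA_rev_scan (l : List (Option Int)) :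
    (pvA_scan none l.reverse).reverse = pvRsc l := by
  induction l with
  | nil => rfl
  | cons x xs ih =>
    have h := pvA_scan_append none xs.reverse [x]
    simp only [List.reverse_cons, h, pvSt_reverse]
    cases x with
    | none =>
      cases hf : pvFstSome xs <;>
        simp [pvA_scan, pvRsc, ih, hf]
    | some v => simp [pvA_scan, pvRsc, ih]

lemma pvCNG_gap (c : Char) (cs : List Char) (hc : c = '-') :
    pvCountNonGap (c :: cs) = pvCountNonGap cs := by
  simp [pvCountNonGap, hc]

lemma pvCNG_nongap (c : Char) (cs : List Char) (hc : ¬ c = '-') :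
    pvCountNonGap (c :: cs) = pvCountNonGap cs + 1 := by
  simp [pvCountNonGap, hc]

lemma pvFstSome_mkRel (cs : List Char) (pbs : List Int)
    (h : pvCountNonGap cs = pbs.length) :
    pvFstSome (pvMkRel cs pbs) = pbs.head? := by
  induction cs generalizing pbs with
  | nil =>
    have : pbs = [] := by
      cases pbs with
      | nil => rfl
      | cons a l => simp [pvCountNonGap] at h
    simp [this, pvMkRel, pvFstSome]
  | cons c cs ih =>
    by_cases hc : c = '-'
    · have h' : pvCountNonGap cs = pbs.length := by rw [pvCNG_gap c cs hc] at h; exact h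
      simp [pvMkRel, hc, pvFstSome, ih pbs h']
    · cases pbs with
      | nil => rw [pvCNG_nongap c cs hc] at h; simp at h
      | cons s ps => simp [pvMkRel, hc, pvFstSome]

-- kernel of the equivalence: A's merged scans equal B's single pass
lemma pv_main (cs : List Char) (pbs : List Int) (left : Option Int)
    (h : pvCountNonGap cs = pbs.length) :
    pvA_final (pvA_scan left (pvMkRel cs pbs)) (pvRsc (pvMkRel cs pbs)) cs
      = pvB_fill left cs pbs := by
  induction cs generalizing pbs left with
  | nil => simp [pvMkRel, pvA_scan, pvRsc, pvA_final, pvB_fill]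
  | cons c cs ih =>
    by_cases hc : c = '-'
    · have h' : pvCountNonGap cs = pbs.length := by rw [pvCNG_gap c cs hc] at h; exact h
      have hf := pvFstSome_mkRel cs pbs h'
      simp only [pvMkRel, hc, pvB_fill]
      refine congrArg₂ _ ?_ (ih pbs left h')
      cases left with
      | none => cases hl : pbs.head? <;> simp [pvA_comb, hf, hl]
      | some l =>
        cases hl : pbs.head? with
        | none => simp [pvA_comb, hf, hl]
        | some r =>
          simp only [pvA_comb, hf, hl]
          rw [Int.min_def]; split_ifs <;> omega
    · cases pbs with
      | nil => rw [pvCNG_nongap c cs hc] at h; simp at h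
      | cons s ps =>
        have h' : pvCountNonGap cs = ps.length := by
          rw [pvCNG_nongap c cs hc] at h; simpa using h
        simp [pvMkRel, hc, pvA_scan, pvRsc, pvA_final, pvA_comb, pvB_fill,
          ih ps (some s) h']

-- one dict entry of A equals one entry of B, given the entry's Pre_ facts
lemma pv_entry (cs : List Char) (pbs : List Int)
    (h : pvCountNonGap cs = pbs.length) :
    pvA_final (pvA_scan none (pvA_mkScores cs pbs 0).1)
      ((pvA_scan none (pvA_mkScores cs pbs 0).1.reverse).reverse) cs
      = pvB_fill none cs pbs := by
  rw [pvA_mkScores_eq_rel, List.drop_zero, pvA_rev_scan]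
  exact pv_main cs pbs none h

-- ===== VERDICT (by name: the statement is the Claim_ definition above) =====
theorem add_indels_to_per_base_scores_spec : Claim_equal_add_indels_to_per_base_scores := by
  intro msa scores _hDom hPre
  obtain ⟨_, _, hall⟩ := hPre
  unfold Spec_add_indels_to_per_base_scores
  unfold add_indels_to_per_base_scores add_indels_to_per_base_scores_alt
  congr 1
  apply PySem.List.foldl_congr_mem
  intro acc p hp
  have hok := (List.all_eq_true.mp hall) p hp
  cases hg : (PySem.Dict.mk scores).get? p.1 with
  | none => rw [hg] at hok; simp at hok
  | some sc =>
    rw [hg] at hok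
    simp only [Bool.and_eq_true, beq_iff_eq] at hok
    have hcnt : pvCountNonGap p.2.toList = sc.length := hok.1
    simp only [Option.getD_some]
    rw [pv_entry _ _ hcnt]
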